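-- pv_equiv track=rewrite | github.com/RogueNAND/cuelist | src/cuelist/seteval.py | evaluate_set
-- ===== SOURCE A (Python) =====
-- from typing import Any
--
-- _OPS = {
--     "add": "__or__",
--     "intersect": "__and__",
--     "sub": "__sub__",
-- }
--
-- def evaluate_set(ops: list[list[str]], mapping: dict[str, Any]) -> Any | None:
--     """Evaluate an ordered operations list against a name-to-object mapping.
--
--     *ops* is a list of ``[operator, name]`` pairs, e.g.
--     ``[["add", "front"], ["sub", "spot"]]``.
--
--     *mapping* maps item names to set-like objects (must support ``|``, ``&``,
--     ``-`` operators).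
--
--     Evaluation is left-to-right:
--
--     - ``"add"``       — union:        ``result | item``
--     - ``"intersect"`` — intersection: ``result & item``
--     - ``"sub"``       — difference:   ``result - item``
--
--     For the first item, the object is assigned directly regardless of operator.
--
--     Returns the composed object, or ``None`` if *ops* is empty.
--     """
--     result: Any | None = None
--
--     for entry in ops:
--         op, name = entry[0], entry[1]
--
--         if name not in mapping:
--             raise ValueError(f"Unknown set item: {name!r}")
--
--         dunder = _OPS.get(op)
--         if dunder is None:
--             raise ValueError(f"Unknown set operator: {op!r}")
--
--         item = mapping[name]
--
--         if result is None:
--             result = item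
--         else:
--             result = getattr(result, dunder)(item)
--
--     return result
-- ===== SOURCE B (Python) =====
-- _OPS = {
--     "add": lambda a, b: a | b,
--     "intersect": lambda a, b: a & b,
--     "sub": lambda a, b: a - b,
-- }
--
-- def evaluate_set(ops, mapping):
--     # Pass 1: validate each entry (name first, then operator, same messages
--     # as the original) and resolve it to an (operator_function, object) record.
--     resolved = []
--     for entry in ops:
--         op, name = entry[0], entry[1]
--         if name not in mapping:
--             raise ValueError(f"Unknown set item: {name!r}")
--         fn = _OPS.get(op)
--         if fn is None:
--             raise ValueError(f"Unknown set operator: {op!r}")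
--         resolved.append((fn, mapping[name]))
--     if not resolved:
--         return None
--     # Pass 2: seed with the first record's object, fold the rest.
--     result = resolved[0][1]
--     for fn, item in resolved[1:]:
--         result = fn(result, item)
--     return result
-- ===== Notes on version B (the rewrite author's own statement) =====
-- stated objective: alternative
-- what changed: Splits A's single fused loop into two passes: first validate every entry and resolve it to an (operator-function, object) record, then seed with the first record's object and fold the remaining records; exception order and messages are preserved.
import Mathlib
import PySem

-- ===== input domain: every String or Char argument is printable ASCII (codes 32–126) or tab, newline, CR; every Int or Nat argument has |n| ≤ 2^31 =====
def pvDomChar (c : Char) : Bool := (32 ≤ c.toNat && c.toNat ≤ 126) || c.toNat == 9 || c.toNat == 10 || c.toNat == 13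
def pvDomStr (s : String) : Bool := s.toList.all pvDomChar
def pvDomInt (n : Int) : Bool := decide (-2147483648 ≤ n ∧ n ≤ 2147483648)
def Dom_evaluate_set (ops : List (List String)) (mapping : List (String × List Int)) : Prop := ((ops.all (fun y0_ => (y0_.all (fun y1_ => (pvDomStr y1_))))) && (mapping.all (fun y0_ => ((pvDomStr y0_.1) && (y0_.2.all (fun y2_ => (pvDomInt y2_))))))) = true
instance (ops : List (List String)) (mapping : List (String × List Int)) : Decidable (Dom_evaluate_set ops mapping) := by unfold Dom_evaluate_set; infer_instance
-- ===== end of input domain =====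

-- B splits A's single fused loop into a validate/resolve pass followed by a seed-and-fold
-- pass (objective: alternative decomposition, same cost).

-- ===== PORT A =====
-- the module-level _OPS table
def pvOpsTable : PySem.Dict String String :=
  PySem.Dict.mk [("add", "__or__"), ("intersect", "__and__"), ("sub", "__sub__")]

-- getattr(result, dunder)(item) on set-valued objects: the three dunders _OPS can yield
def pvGetattrApply (dunder : String) (a b : List Int) : List Int :=
  if dunder == "__or__" then PySem.Set.union a b
  else if dunder == "__and__" then PySem.Set.inter a b
  else PySem.Set.diff a b          -- "__sub__", the only other value in _OPS

-- the 'for entry in ops' loop, carrying 'result'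
def evaluateSetLoop (mapping : List (String × List Int)) :
    List (List String) → Option (List Int) → Option (List Int)
  | [], result => result
  | entry :: rest, result =>
    match PySem.List.pyGet? entry 0, PySem.List.pyGet? entry 1 with
    | some op, some name =>
      if PySem.Dict.contains (PySem.Dict.mk mapping) name then
        match PySem.Dict.get? pvOpsTable op with
        | none => none             -- raise ValueError: unknown operator
        | some dunder =>
          let item := PySem.Dict.getD (PySem.Dict.mk mapping) name []
          match result with
          | none => evaluateSetLoop mapping rest (some item)
          | some r => evaluateSetLoop mapping rest (some (pvGetattrApply dunder r item))
      else none                    -- raise ValueError: unknown item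
    | _, _ => none                 -- entry[0]/entry[1]: IndexError

def evaluate_set (ops : List (List String)) (mapping : List (String × List Int)) : Option (List Int) :=
  evaluateSetLoop mapping ops none

-- ===== PORT B =====
-- keys of B's _OPS table; its lambda values (a|b, a&b, a-b) are applied by pvFnApply below
def pvFnKeys : List String := ["add", "intersect", "sub"]

def pvFnApply (op : String) (a b : List Int) : List Int :=
  if op == "add" then PySem.Set.union a b
  else if op == "intersect" then PySem.Set.inter a b
  else PySem.Set.diff a b          -- "sub", the only other key of B's _OPS

-- pass 1: validate each entry and resolve it to an (operator-tag, object) record; none = raise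
def pvResolve (mapping : List (String × List Int)) :
    List (List String) → Option (List (String × List Int))
  | [] => some []
  | entry :: rest =>
    match PySem.List.pyGet? entry 0, PySem.List.pyGet? entry 1 with
    | some op, some name =>
      if PySem.Dict.contains (PySem.Dict.mk mapping) name then
        if pvFnKeys.contains op then
          match pvResolve mapping rest with
          | some recs => some ((op, PySem.Dict.getD (PySem.Dict.mk mapping) name []) :: recs)
          | none => none
        else none
      else none
    | _, _ => none

def evaluate_set_alt (ops : List (List String)) (mapping : List (String × List Int)) : Option (List Int) :=
  match pvResolve mapping ops with
  | none => none                   -- an exception propagated from pass 1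
  | some [] => none                -- empty ops: Python returns None
  | some ((_, item0) :: rest) =>   -- pass 2: seed with the first object, fold the rest
      some (rest.foldl (fun acc r => pvFnApply r.1 acc r.2) item0)

-- ===== PRECONDITION & SPEC =====
-- Pre_ excludes exactly the inputs on which the Python A raises: an entry shorter than 2
-- (IndexError) or with an unknown name or operator (ValueError).
def Pre_evaluate_set (ops : List (List String)) (mapping : List (String × List Int)) : Prop :=
  ∀ e ∈ ops, 2 ≤ e.length ∧
    PySem.Dict.contains (PySem.Dict.mk mapping) (e.getD 1 "") = true ∧
    (e.getD 0 "" = "add" ∨ e.getD 0 "" = "intersect" ∨ e.getD 0 "" = "sub")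
instance (ops : List (List String)) (mapping : List (String × List Int)) : Decidable (Pre_evaluate_set ops mapping) := by unfold Pre_evaluate_set; infer_instance

def pvWitness_evaluate_set : List (List String) × (List (String × List Int)) :=
  ([["add", "front"], ["sub", "spot"]], [("front", [1, 2]), ("spot", [2, 3])])

def Spec_evaluate_set (ops : List (List String)) (mapping : List (String × List Int)) (out : Option (List Int)) : Prop := out = evaluate_set_alt ops mapping
instance (ops : List (List String)) (mapping : List (String × List Int)) (out : Option (List Int)) : Decidable (Spec_evaluate_set ops mapping out) := by unfold Spec_evaluate_set; infer_instance

-- ===== CLAIM (what is proved, stated in full; the proofs are below) =====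
def Claim_equal_evaluate_set : Prop := ∀ (ops : List (List String)) (mapping : List (String × List Int)), Dom_evaluate_set ops mapping → Pre_evaluate_set ops mapping → Spec_evaluate_set ops mapping (evaluate_set ops mapping)

-- ===== LEMMAS AND PROOFS =====
theorem pvPyGet1 {a b : String} {t : List String} :
    PySem.List.pyGet? (a :: b :: t) 1 = some b := by
  simp [PySem.List.pyGet?, PySem.List.pyIdx?]

-- the invariant: on valid entries, pass 1 succeeds and A's loop from accumulator 'some r'
-- computes B's fold of the resolved records seeded with r
theorem pvLoopResolve (mapping : List (String × List Int)) (entries : List (List String))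
    (h : ∀ e ∈ entries, 2 ≤ e.length ∧
      PySem.Dict.contains (PySem.Dict.mk mapping) (e.getD 1 "") = true ∧
      (e.getD 0 "" = "add" ∨ e.getD 0 "" = "intersect" ∨ e.getD 0 "" = "sub")) :
    ∃ recs, pvResolve mapping entries = some recs ∧
      ∀ r, evaluateSetLoop mapping entries (some r) =
        some (recs.foldl (fun acc x => pvFnApply x.1 acc x.2) r) := by
  induction entries with
  | nil => exact ⟨[], rfl, fun r => rfl⟩
  | cons e rest ih =>
    obtain ⟨he2, hname, hop⟩ := h e (List.mem_cons_self)
    obtain ⟨recs, hres, hloop⟩ := ih (fun e' he' => h e' (List.mem_cons_of_mem _ he'))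
    match e, he2 with
    | op :: name :: t, _ =>
      simp only [List.getD, List.getElem?_cons_zero, Option.getD_some,
        List.getElem?_cons_succ] at hname hop
      refine ⟨(op, PySem.Dict.getD (PySem.Dict.mk mapping) name []) :: recs, ?_, ?_⟩
      · simp only [pvResolve, PySem.List.pyGet?_zero_cons, pvPyGet1, hname, hres]
        rcases hop with h' | h' | h' <;> subst h' <;> rfl
      · intro r
        simp only [evaluateSetLoop, PySem.List.pyGet?_zero_cons, pvPyGet1, hname, List.foldl]
        rcases hop with h' | h' | h' <;> subst h' <;>
          simpa [pvOpsTable, PySem.Dict.get?, pvGetattrApply, pvFnApply] using hloop _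

-- ===== VERDICT (by name: the statement is the Claim_ definition above) =====
theorem evaluate_set_spec : Claim_equal_evaluate_set := by
  intro ops mapping _hdom hpre
  unfold Spec_evaluate_set
  match ops with
  | [] => rfl
  | e :: rest =>
    obtain ⟨he2, hname, hop⟩ := hpre e (List.mem_cons_self)
    obtain ⟨recs, hres, hloop⟩ :=
      pvLoopResolve mapping rest (fun e' he' => hpre e' (List.mem_cons_of_mem _ he'))
    match e, he2 with
    | op :: name :: t, _ =>
      simp only [List.getD, List.getElem?_cons_zero, Option.getD_some,
        List.getElem?_cons_succ] at hname hop
      simp only [evaluate_set, evaluate_set_alt, evaluateSetLoop, pvResolve,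
        PySem.List.pyGet?_zero_cons, pvPyGet1, hname, hres]
      rcases hop with h' | h' | h' <;> subst h' <;>
        simpa [pvOpsTable, PySem.Dict.get?] using hloop _
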